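-- pv_equiv track=rewrite | github.com/umangkumarr/CodeJunkDrawer | Absolute Junk/Python/makepowerof2.py | solve
-- ===== SOURCE A (Python) =====
-- def solve(a,b):
--     count=0
--     a1=0
--     b1=0
--     while a1<len(a) and b1<len(b):
--         if a[a1]==b[b1]:
--             b1+=1
--             count+=1
--         a1+=1
--     return len(a) - 2*count + len(b)
-- ===== SOURCE B (Python) =====
-- def solve(a, b):
--     # Index a once: for each character, a stack of its positions (smallest on top).
--     pos = {}
--     for i in range(len(a) - 1, -1, -1):
--         pos.setdefault(a[i], []).append(i)
--     cur = 0
--     count = 0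
--     for ch in b:
--         lst = pos.get(ch, [])
--         while lst and lst[-1] < cur:
--             lst.pop()
--         if not lst:
--             break
--         cur = lst[-1] + 1
--         lst.pop()
--         count += 1
--     return len(a) - 2 * count + len(b)
-- ===== Notes on version B (the rewrite author's own statement) =====
-- stated objective: alternative
-- what changed: Replaces the single greedy two-pointer scan of a with a two-phase algorithm: first build a dictionary indexing every character of a to the stack of its positions (smallest on top), then walk b consuming from those per-character position stacks, so a is never scanned during matching.
import Mathlib
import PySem

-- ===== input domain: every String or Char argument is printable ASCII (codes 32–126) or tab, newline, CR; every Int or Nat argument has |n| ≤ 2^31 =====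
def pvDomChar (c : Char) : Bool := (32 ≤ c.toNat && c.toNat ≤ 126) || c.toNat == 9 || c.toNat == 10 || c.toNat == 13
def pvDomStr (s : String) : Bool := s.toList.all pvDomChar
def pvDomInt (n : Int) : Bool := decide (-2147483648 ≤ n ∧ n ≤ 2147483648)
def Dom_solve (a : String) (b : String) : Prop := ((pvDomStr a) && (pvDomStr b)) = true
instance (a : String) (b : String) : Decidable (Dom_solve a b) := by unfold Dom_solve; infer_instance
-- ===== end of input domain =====

-- B replaces A's single greedy two-pointer scan with a two-phase algorithm (index a by character
-- into position stacks, then walk b consuming from the stacks); same cost, same result.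

-- ===== PORT A =====
-- A's while loop: steps through a one char at a time, advancing the b pointer (and count) on match.
def solveLoop : List Char → List Char → Int → Int
  | [], _, count => count
  | _ :: _, [], count => count
  | x :: xs, y :: ys, count =>
      if x = y then solveLoop xs ys (count + 1) else solveLoop xs (y :: ys) count

def solve (a : String) (b : String) : Int :=
  (a.toList.length : Int) - 2 * solveLoop a.toList b.toList 0 + (b.toList.length : Int)

-- ===== PORT B =====
-- Source B's inner while loop: `while lst and lst[-1] < cur: lst.pop()`
def popLow (cur : Int) : List Int → List Int
  | [] => []
  | x :: xs =>
      if (x :: xs).getLast (by simp) < cur then popLow cur (x :: xs).dropLast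
      else x :: xs
  termination_by l => l.length
  decreasing_by simp

-- Source B's first loop: `for i in range(len(a)-1, -1, -1): pos.setdefault(a[i], []).append(i)`
def buildPos (a : List Char) : PySem.Dict Char (List Int) :=
  (PySem.List.pyRange ((a.length : Int) - 1) (-1) (-1)).foldl
    (fun d i => d.modify (PySem.List.pyGetD a i ' ') [] (fun l => l ++ [i])) PySem.Dict.empty

-- Source B's second loop (for ch in b, with break), state = (pos, cur, count)
def bLoop (pos : PySem.Dict Char (List Int)) (cur count : Int) : List Char → Int
  | [] => count
  | ch :: bs =>
      let lst := popLow cur (pos.getD ch [])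
      if h : lst = [] then count
      else bLoop (pos.insert ch lst.dropLast) (lst.getLast h + 1) (count + 1) bs

def solve_alt (a : String) (b : String) : Int :=
  (a.toList.length : Int) - 2 * bLoop (buildPos a.toList) 0 0 b.toList +
    (b.toList.length : Int)

-- ===== PRECONDITION & SPEC =====
def Spec_solve (a : String) (b : String) (out : Int) : Prop := out = solve_alt a b
instance (a : String) (b : String) (out : Int) : Decidable (Spec_solve a b out) := by unfold Spec_solve; infer_instance

-- ===== CLAIM (what is proved, stated in full; the proofs are below) =====
def Claim_equal_solve : Prop := ∀ (a : String) (b : String), Dom_solve a b → Spec_solve a b (solve a b)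

-- ===== LEMMAS AND PROOFS =====

-- positions (as Int, counted from s) of the occurrences of ch in a list
def ascPosFrom (s : Int) : List Char → Char → List Int
  | [], _ => []
  | x :: xs, ch =>
      if x = ch then s :: ascPosFrom (s + 1) xs ch else ascPosFrom (s + 1) xs ch

-- common greedy-count spec: repeatedly take the first stored occurrence ≥ cur
def gcnt (a : List Char) (cur : Int) : List Char → Int
  | [] => 0
  | ch :: bs =>
      match (ascPosFrom 0 a ch).find? (fun p => decide (cur ≤ p)) with
      | some p => 1 + gcnt a (p + 1) bs
      | none => 0

theorem ascPosFrom_le {ch : Char} : ∀ (xs : List Char) (s p : Int),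
    p ∈ ascPosFrom s xs ch → s ≤ p := by
  intro xs
  induction xs with
  | nil => intro s p h; simp [ascPosFrom] at h
  | cons x xs ih =>
      intro s p h
      by_cases hx : x = ch
      · simp [ascPosFrom, hx] at h
        rcases h with h | h
        · omega
        · have := ih (s + 1) p h; omega
      · simp [ascPosFrom, hx] at h
        have := ih (s + 1) p h; omega

theorem ascPosFrom_append (ch : Char) : ∀ (xs ys : List Char) (s : Int),
    ascPosFrom s (xs ++ ys) ch =
      ascPosFrom s xs ch ++ ascPosFrom (s + xs.length) ys ch := by
  intro xs
  induction xs with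
  | nil => intro ys s; simp [ascPosFrom]
  | cons x xs ih =>
      intro ys s
      by_cases hx : x = ch <;>
        simp [ascPosFrom, hx, ih ys (s + 1)] <;>
        ring_nf

-- A's scan of a suffix = head of the stored occurrence list of that suffix
theorem solveLoop_scan (ch : Char) (bs : List Char) :
    ∀ (ys : List Char) (s : Int) (c : Int),
      solveLoop ys (ch :: bs) c =
        match (ascPosFrom s ys ch).head? with
        | none => c
        | some p => solveLoop (ys.drop ((p - s).toNat + 1)) bs (c + 1) := by
  intro ys
  induction ys with
  | nil => intro s c; simp [solveLoop, ascPosFrom]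
  | cons y ys ih =>
      intro s c
      by_cases hy : y = ch
      · simp [solveLoop, hy, ascPosFrom]
      · simp only [solveLoop, if_neg hy, ascPosFrom]
        rw [ih (s + 1) c]
        cases hh : (ascPosFrom (s + 1) ys ch).head? with
        | none => simp
        | some p =>
            have hp : s + 1 ≤ p := by
              apply ascPosFrom_le ys (s + 1) p
              exact List.mem_of_mem_head? hh
            simp only []
            have : (p - s).toNat + 1 = ((p - (s + 1)).toNat + 1) + 1 := by omega
            rw [this]
            simp [List.drop_succ_cons]

-- find? over the full occurrence list, from cur, = head of the occurrences of the suffix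
theorem find_eq_head (ch : Char) : ∀ (xs : List Char) (s cur : Int), s ≤ cur →
    (ascPosFrom s xs ch).find? (fun p => decide (cur ≤ p)) =
      (ascPosFrom cur (xs.drop (cur - s).toNat) ch).head? := by
  intro xs
  induction xs with
  | nil => intro s cur _; simp [ascPosFrom]
  | cons x xs ih =>
      intro s cur hs
      rcases eq_or_lt_of_le hs with heq | hlt
      · subst heq
        have hd : (s - s).toNat = 0 := by omega
        rw [hd, List.drop_zero]
        cases hh : ascPosFrom s (x :: xs) ch with
        | nil => simp
        | cons p ps =>
            have hp : s ≤ p := by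
              apply ascPosFrom_le (x :: xs) s p
              rw [hh]; exact List.mem_cons_self
            simp [List.find?, hp]
      · have hdrop : (cur - s).toNat = (cur - (s + 1)).toNat + 1 := by omega
        rw [hdrop]
        by_cases hx : x = ch
        · simp only [ascPosFrom, if_pos hx, List.find?, List.drop_succ_cons]
          have : (decide (cur ≤ s)) = false := by simp; omega
          rw [this]
          exact ih (s + 1) cur (by omega)
        · simp only [ascPosFrom, if_neg hx, List.drop_succ_cons]
          exact ih (s + 1) cur (by omega)

-- A's loop computes gcnt
theorem solveLoop_eq_gcnt (a : List Char) : ∀ (bs : List Char) (cur c : Int), 0 ≤ cur →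
    solveLoop (a.drop cur.toNat) bs c = c + gcnt a cur bs := by
  intro bs
  induction bs with
  | nil =>
      intro cur c _
      cases a.drop cur.toNat <;> simp [solveLoop, gcnt]
  | cons ch bs ih =>
      intro cur c hcur
      rw [solveLoop_scan ch bs (a.drop cur.toNat) cur c]
      have hfind := find_eq_head ch a 0 cur hcur
      simp only [Int.sub_zero] at hfind
      rw [gcnt, hfind]
      cases hh : (ascPosFrom cur (a.drop cur.toNat) ch).head? with
      | none => simp
      | some p =>
          have hp : cur ≤ p := by
            apply ascPosFrom_le _ cur p
            exact List.mem_of_mem_head? hh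
          simp only []
          rw [List.drop_drop]
          have harg : cur.toNat + ((p - cur).toNat + 1) = (p + 1).toNat := by omega
          rw [harg, ih (p + 1) (c + 1) (by omega)]
          ring

-- the build loop: each character's entry is the reversed occurrence list
theorem buildPos_getD (a : List Char) : ∀ (m : Nat), m ≤ a.length → ∀ (d : PySem.Dict Char (List Int)) (ch : Char),
    (((PySem.List.pyRange ((m : Int) - 1) (-1) (-1)).foldl
        (fun d i => d.modify (PySem.List.pyGetD a i ' ') [] (fun l => l ++ [i])) d).getD ch []) =
      d.getD ch [] ++ (ascPosFrom 0 (a.take m) ch).reverse := by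
  intro m
  induction m with
  | zero =>
      intro _ d ch
      rw [PySem.List.pyRange_neg_one_eq_nil (by omega)]
      simp [ascPosFrom]
  | succ m ih =>
      intro hm d ch
      have hlt : m < a.length := by omega
      rw [show ((m + 1 : Nat) : Int) - 1 = (m : Int) by push_cast; ring]
      rw [PySem.List.pyRange_neg_one_cons (by omega), List.foldl_cons]
      rw [ih (by omega)]
      have hget : PySem.List.pyGetD a ((m : Nat) : Int) ' ' = a[m] := by
        simp [PySem.List.pyGetD_natCast, List.getD_eq_getElem?_getD, List.getElem?_eq_getElem hlt]
      rw [hget]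
      have htake : a.take (m + 1) = a.take m ++ [a[m]] :=
        (List.take_concat_get' a m hlt).symm
      rw [htake, ascPosFrom_append, List.reverse_append]
      have hlen : ((a.take m).length : Int) = (m : Int) := by
        simp [List.length_take, Nat.min_eq_left (le_of_lt hlt)]
      rw [hlen]
      by_cases hx : a[m] = ch
      · rw [← hx, PySem.Dict.getD_modify_self]
        simp [ascPosFrom]
      · rw [PySem.Dict.getD_modify_of_ne _ _ _ (fun h => hx h.symm)]
        simp [ascPosFrom, hx]

theorem popLow_ne_nil (cur : Int) (l : List Int) (h : l ≠ []) :
    popLow cur l = if l.getLast h < cur then popLow cur l.dropLast else l := by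
  cases l with
  | nil => exact absurd rfl h
  | cons x xs => simp only [popLow]

-- the pop-while loop on a reversed list drops the low elements
theorem popLow_reverse (cur : Int) : ∀ (ys : List Int),
    popLow cur ys.reverse = (ys.dropWhile (fun p => decide (p < cur))).reverse := by
  intro ys
  induction ys with
  | nil => simp [popLow]
  | cons y ys ih =>
      have hrev : (y :: ys).reverse = ys.reverse ++ [y] := by simp
      have hne : (y :: ys).reverse ≠ [] := by
        rw [hrev]; exact List.append_ne_nil_of_right_ne_nil _ (by simp)
      have hlast : ((y :: ys).reverse).getLast hne = y := by
        rw [List.getLast_eq_iff_getLast?_eq_some, List.getLast?_reverse]; rfl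
      have hdl : ((y :: ys).reverse).dropLast = ys.reverse := by
        rw [hrev]; exact List.dropLast_concat
      rw [popLow_ne_nil cur _ hne, hlast, hdl]
      by_cases hy : y < cur
      · rw [if_pos hy, ih]
        simp [hy]
      · rw [if_neg hy]
        simp [hy]

theorem dropWhile_head_false (p : Int → Bool) (l r' : List Int) (x : Int)
    (h : l.dropWhile p = x :: r') : p x = false := by
  have := List.head?_dropWhile_not p l
  rw [h] at this; simpa using this

-- B's loop computes gcnt: invariant = each stack is the reverse of a tail of the
-- occurrence list, all skipped occurrences lying below cur
theorem bLoop_eq_gcnt (a : List Char) : ∀ (bs : List Char) (d : PySem.Dict Char (List Int)) (cur c : Int),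
    0 ≤ cur →
    (∀ ch : Char, ∃ k : Nat, k ≤ (ascPosFrom 0 a ch).length ∧
        d.getD ch [] = ((ascPosFrom 0 a ch).drop k).reverse ∧
        ∀ p ∈ (ascPosFrom 0 a ch).take k, p < cur) →
    bLoop d cur c bs = c + gcnt a cur bs := by
  intro bs
  induction bs with
  | nil => intro d cur c _ _; simp [bLoop, gcnt]
  | cons ch bs ih =>
      intro d cur c hcur hinv
      obtain ⟨k, hk, hd, hlow⟩ := hinv ch
      have hsplit : ascPosFrom 0 a ch =
          (ascPosFrom 0 a ch).take k ++ (ascPosFrom 0 a ch).drop k :=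
        (List.take_append_drop k _).symm
      have hlen : ((ascPosFrom 0 a ch).take k).length = k := by
        simp [List.length_take, Nat.min_eq_left hk]
      set A := ascPosFrom 0 a ch with hA
      set t := (A.drop k).takeWhile (fun p => decide (p < cur)) with ht
      set r := (A.drop k).dropWhile (fun p => decide (p < cur)) with hr
      have htr : A.drop k = t ++ r := (List.takeWhile_append_dropWhile).symm
      have hpop : popLow cur (d.getD ch []) = r.reverse := by
        rw [hd, popLow_reverse]
      have hfind : A.find? (fun p => decide (cur ≤ p)) = r.find? (fun p => decide (cur ≤ p)) := by
        conv_lhs => rw [hsplit, htr]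
        rw [List.find?_append, List.find?_append]
        have h1 : (A.take k).find? (fun p => decide (cur ≤ p)) = none := by
          apply List.find?_eq_none.mpr
          intro x hx
          simp only [decide_eq_true_eq]
          exact fun hc => absurd (hlow x hx) (by omega)
        have h2 : t.find? (fun p => decide (cur ≤ p)) = none := by
          apply List.find?_eq_none.mpr
          intro x hx
          have := List.mem_takeWhile_imp hx
          simp only [decide_eq_true_eq] at this ⊢
          omega
        rw [h1, h2]
        simp
      cases hrc : r with
      | nil =>
          simp only [bLoop, hpop, hrc, List.reverse_nil, dite_true]
          rw [gcnt, hfind, hrc]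
          simp
      | cons p r' =>
          have hpge : cur ≤ p := by
            have := dropWhile_head_false (fun q => decide (q < cur)) (A.drop k) r' p (by rw [← hr, hrc])
            simp only [decide_eq_false_iff_not] at this
            omega
          have hfr : r.find? (fun q => decide (cur ≤ q)) = some p := by
            rw [hrc]; exact List.find?_cons_of_pos (by simpa using hpge)
          have hlrev : (p :: r').reverse = r'.reverse ++ [p] := by simp
          have hlne : (p :: r').reverse ≠ [] := by
            rw [hlrev]; exact List.append_ne_nil_of_right_ne_nil _ (by simp)
          have hlast : ∀ h', ((p :: r').reverse).getLast h' = p := by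
            intro h'
            rw [List.getLast_eq_iff_getLast?_eq_some, List.getLast?_reverse]
            rfl
          have hdl : ((p :: r').reverse).dropLast = r'.reverse := by
            rw [hlrev]; exact List.dropLast_concat
          simp only [bLoop, hpop, hrc, dif_neg hlne, hlast, hdl]
          rw [gcnt, hfind, hfr]
          have hinv' : ∀ ch' : Char, ∃ k' : Nat, k' ≤ (ascPosFrom 0 a ch').length ∧
              ((d.insert ch r'.reverse).getD ch' [] = ((ascPosFrom 0 a ch').drop k').reverse) ∧
              ∀ q ∈ (ascPosFrom 0 a ch').take k', q < p + 1 := by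
            intro ch'
            by_cases hch : ch' = ch
            · subst hch
              have hsuffix : A.drop k = (t ++ [p]) ++ r' := by
                rw [htr, hrc]; simp
              have h4 : A.drop (k + (t.length + 1)) = r' := by
                rw [← List.drop_drop, hsuffix,
                  show t.length + 1 = (t ++ [p]).length by simp, List.drop_left]
              have h5 : A.take (k + (t.length + 1)) = A.take k ++ (t ++ [p]) := by
                rw [List.take_add, hsuffix,
                  show t.length + 1 = (t ++ [p]).length by simp, List.take_left]
              refine ⟨k + (t.length + 1), ?_, ?_, ?_⟩
              · rw [← hA]
                have := congrArg List.length hsuffix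
                simp [List.length_drop] at this
                omega
              · rw [PySem.Dict.getD_insert_self, ← hA, h4]
              · intro q hq
                rw [← hA, h5] at hq
                rcases List.mem_append.mp hq with hq | hq
                · have := hlow q hq; omega
                · rcases List.mem_append.mp hq with hq | hq
                  · have := List.mem_takeWhile_imp hq
                    simp only [decide_eq_true_eq] at this
                    omega
                  · simp at hq; omega
            · obtain ⟨k', hk', hd', hlow'⟩ := hinv ch'
              refine ⟨k', hk', ?_, ?_⟩
              · rw [PySem.Dict.getD_insert_of_ne _ _ _ hch]
                exact hd'
              · intro q hq
                have := hlow' q hq; omega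
          rw [ih _ (p + 1) (c + 1) (by omega) hinv']
          ring

theorem getD_empty_nil (ch : Char) : (PySem.Dict.empty : PySem.Dict Char (List Int)).getD ch [] = [] := rfl

-- ===== VERDICT (by name: the statement is the Claim_ definition above) =====
theorem solve_spec : Claim_equal_solve := by
  intro a b _
  show _ = solve_alt a b
  unfold solve solve_alt
  have hA : solveLoop a.toList b.toList 0 = 0 + gcnt a.toList 0 b.toList := by
    have := solveLoop_eq_gcnt a.toList b.toList 0 0 (by omega)
    simpa using this
  have hB : bLoop (buildPos a.toList) 0 0 b.toList = 0 + gcnt a.toList 0 b.toList := by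
    apply bLoop_eq_gcnt a.toList b.toList _ 0 0 (by omega)
    intro ch
    refine ⟨0, by omega, ?_, by simp⟩
    unfold buildPos
    rw [buildPos_getD a.toList a.toList.length (le_refl _) PySem.Dict.empty ch,
        List.take_length, getD_empty_nil]
    simp
  rw [hA, hB]
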